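-- pv_equiv track=rewrite | github.com/greenlemonT/algorithm | 프로그래머스/0/181906. 접두사인지 확인하기/접두사인지 확인하기.py | solution
-- ===== SOURCE A (Python) =====
-- def solution(my_string, is_prefix):
--     answer=0
--     tmp=[my_string[:i] for i in range(len(my_string))]
--     if is_prefix in tmp:
--         answer=1
--     else:
--         answer=0
--     return answer
-- ===== SOURCE B (Python) =====
-- def solution(my_string, is_prefix):
--     return 1 if len(is_prefix) < len(my_string) and my_string.startswith(is_prefix) else 0
-- ===== Notes on version B (the rewrite author's own statement) =====
-- stated objective: simpler
-- what changed: Replaces building the list of all proper prefixes and testing membership with a strict length check plus a direct startswith prefix test.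
import Mathlib
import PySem

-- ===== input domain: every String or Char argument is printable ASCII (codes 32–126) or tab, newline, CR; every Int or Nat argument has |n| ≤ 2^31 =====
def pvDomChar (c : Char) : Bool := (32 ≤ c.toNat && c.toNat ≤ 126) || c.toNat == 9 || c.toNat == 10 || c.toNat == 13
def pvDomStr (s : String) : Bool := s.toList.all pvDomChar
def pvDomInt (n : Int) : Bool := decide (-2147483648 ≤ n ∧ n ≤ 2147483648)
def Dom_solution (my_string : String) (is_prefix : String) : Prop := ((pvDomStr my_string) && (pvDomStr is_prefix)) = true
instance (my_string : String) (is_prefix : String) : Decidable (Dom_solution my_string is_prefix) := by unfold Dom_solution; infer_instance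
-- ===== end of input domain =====

-- B replaces A's list-of-all-proper-prefixes membership test by a strict length check plus a direct startswith prefix test (simpler, single scan).


-- ===== PORT A =====
def solution (my_string : String) (is_prefix : String) : Int :=
  let tmp : List String :=
    (PySem.List.pyRange 0 (PySem.Str.len my_string) 1).map
      (fun i => PySem.Str.slice my_string none (some i))
  if is_prefix ∈ tmp then 1 else 0

-- ===== PORT B =====
def solution_alt (my_string : String) (is_prefix : String) : Int :=
  if PySem.Str.len is_prefix < PySem.Str.len my_string ∧
     PySem.Str.startswith my_string is_prefix = true then 1 else 0

-- ===== PRECONDITION & SPEC =====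
def Spec_solution (my_string : String) (is_prefix : String) (out : Int) : Prop := out = solution_alt my_string is_prefix
instance (my_string : String) (is_prefix : String) (out : Int) : Decidable (Spec_solution my_string is_prefix out) := by unfold Spec_solution; infer_instance

-- ===== CLAIM (what is proved, stated in full; the proofs are below) =====
def Claim_equal_solution : Prop := ∀ (my_string : String) (is_prefix : String), Dom_solution my_string is_prefix → Spec_solution my_string is_prefix (solution my_string is_prefix)

-- ===== LEMMAS AND PROOFS =====

-- A's membership in [my_string[:i] for i in range(len(my_string))] is exactly
-- "is_prefix is strictly shorter and a prefix".
theorem mem_proper_prefixes (my_string is_prefix : String) :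
    (is_prefix ∈ (PySem.List.pyRange 0 (PySem.Str.len my_string) 1).map
        (fun i => PySem.Str.slice my_string none (some i)))
    ↔ (is_prefix.toList.length < my_string.toList.length ∧
        is_prefix.toList <+: my_string.toList) := by
  simp only [List.mem_map, PySem.List.mem_pyRange_one]
  constructor
  · rintro ⟨i, ⟨h0, hi⟩, rfl⟩
    have hl : (PySem.Str.slice my_string none (some i)).toList
        = my_string.toList.take i.toNat := by
      rw [PySem.Str.toList_slice]
      simp [PySem.Chars.slice, PySem.List.slice_to my_string.toList h0]
    rw [PySem.Str.len_eq] at hi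
    constructor
    · rw [hl]; simp only [List.length_take]; omega
    · rw [hl]; exact List.take_prefix _ _
  · rintro ⟨hlen, hpre⟩
    refine ⟨(is_prefix.toList.length : Int), ⟨by positivity, ?_⟩, ?_⟩
    · rw [PySem.Str.len_eq]; exact_mod_cast hlen
    · apply String.toList_inj.mp
      rw [PySem.Str.toList_slice]
      simp only [PySem.Chars.slice,
        PySem.List.slice_to my_string.toList (show (0:Int) ≤ (is_prefix.toList.length : Int) by positivity),
        Int.toNat_natCast]
      exact (List.prefix_iff_eq_take.mp hpre).symm

-- ===== VERDICT (by name: the statement is the Claim_ definition above) =====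
theorem solution_spec : Claim_equal_solution := by
  intro my_string is_prefix _
  unfold Spec_solution solution solution_alt
  simp only [mem_proper_prefixes]
  simp only [PySem.Str.len_eq, PySem.Str.startswith_eq, PySem.Chars.startswith_iff]
  split_ifs with h1 h2 h2
  · rfl
  · exact absurd ⟨by exact_mod_cast h1.1, h1.2⟩ h2
  · exact absurd ⟨by exact_mod_cast h2.1, h2.2⟩ h1
  · rfl
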